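-- pv_equiv track=rewrite | github.com/Abhishekchhetri020/smarttime-ai | solver/main.py | _consecutive_overflow
-- ===== SOURCE A (Python) =====
-- from typing import Any, Dict, List, Optional, Tuple
--
-- def _consecutive_overflow(periods: List[int], limit: int) -> int:
--     if not periods or limit <= 0:
--         return 0
--     s = sorted(set(periods))
--     overflow = 0
--     run = 1
--     for i in range(1, len(s)):
--         if s[i] == s[i - 1] + 1:
--             run += 1
--         else:
--             if run > limit:
--                 overflow += run - limit
--             run = 1
--     if run > limit:
--         overflow += run - limit
--     return overflow
-- ===== SOURCE B (Python) =====
-- def _consecutive_overflow(periods, limit):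
--     if limit <= 0:
--         return 0
--     s = set(periods)
--     total = 0
--     for v in s:
--         if v - 1 not in s:
--             end = v
--             while end + 1 in s:
--                 end += 1
--             run = end - v + 1
--             if run > limit:
--                 total += run - limit
--     return total
-- ===== Notes on version B (the rewrite author's own statement) =====
-- stated objective: alternative
-- what changed: Replaces A's sort-then-linear-scan over the deduplicated values with a hash-set pass that finds each run's start (v-1 absent from the set), walks the run once and sums the overflow.
import Mathlib
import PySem

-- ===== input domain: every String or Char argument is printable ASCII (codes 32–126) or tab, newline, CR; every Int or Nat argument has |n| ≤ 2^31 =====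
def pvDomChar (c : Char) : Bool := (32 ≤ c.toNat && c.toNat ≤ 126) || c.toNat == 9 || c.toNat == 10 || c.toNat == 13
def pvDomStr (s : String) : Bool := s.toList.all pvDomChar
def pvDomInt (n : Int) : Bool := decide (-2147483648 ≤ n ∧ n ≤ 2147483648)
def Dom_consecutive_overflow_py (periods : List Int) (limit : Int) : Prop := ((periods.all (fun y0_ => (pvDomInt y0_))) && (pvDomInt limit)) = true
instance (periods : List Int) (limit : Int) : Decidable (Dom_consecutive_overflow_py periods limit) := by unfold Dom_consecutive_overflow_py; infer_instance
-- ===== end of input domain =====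

-- B replaces A's sort-then-scan with a hash-set run walk (find each run's start, walk it once);
-- objective: alternative (a different algorithm; no measured speed difference).

-- ===== PORT A =====
-- the for-loop over range(1, len(s)) reading s[i], s[i-1]: recursion over the tail carrying prev, overflow, run
def aLoop (limit : Int) : Int → List Int → Int → Int → Int
  | _, [], overflow, run => if run > limit then overflow + (run - limit) else overflow
  | prev, x :: xs, overflow, run =>
      if x = prev + 1 then aLoop limit x xs overflow (run + 1)
      else aLoop limit x xs (if run > limit then overflow + (run - limit) else overflow) 1

def consecutive_overflow_py (periods : List Int) (limit : Int) : Int :=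
  if periods = [] ∨ limit ≤ 0 then 0
  else
    match PySem.List.sorted (PySem.Set.ofList periods) (fun x => x) false with
    | [] => 0  -- unreachable: periods ≠ []
    | h :: t => aLoop limit h t 0 1

-- ===== PORT B =====
-- the while loop 'while end + 1 in s: end += 1', counting steps; fuel = |s| bounds the walk (a run has at most |s| elements)
def bWalk (S : List Int) : Int → Nat → Int
  | _, 0 => 0
  | v, Nat.succ f => if S.contains (v + 1) then 1 + bWalk S (v + 1) f else 0

def consecutive_overflow_py_alt (periods : List Int) (limit : Int) : Int :=
  if limit ≤ 0 then 0
  else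
    let S := PySem.Set.ofList periods
    S.foldl (fun total v =>
      if !S.contains (v - 1) then
        let run := 1 + bWalk S v S.length
        if run > limit then total + (run - limit) else total
      else total) 0

-- ===== PRECONDITION & SPEC =====
def Spec_consecutive_overflow_py (periods : List Int) (limit : Int) (out : Int) : Prop := out = consecutive_overflow_py_alt periods limit
instance (periods : List Int) (limit : Int) (out : Int) : Decidable (Spec_consecutive_overflow_py periods limit out) := by unfold Spec_consecutive_overflow_py; infer_instance

-- ===== CLAIM (what is proved, stated in full; the proofs are below) =====
def Claim_equal_consecutive_overflow_py : Prop := ∀ (periods : List Int) (limit : Int), Dom_consecutive_overflow_py periods limit → Spec_consecutive_overflow_py periods limit (consecutive_overflow_py periods limit)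

-- ===== LEMMAS AND PROOFS =====

-- contribution of one maximal run of length `run`
def contrib (limit run : Int) : Int := if run > limit then run - limit else 0

-- length of the leading consecutive run starting at p in the sorted tail
def runFrom : Int → List Int → Int
  | _, [] => 1
  | p, x :: xs => if x = p + 1 then 1 + runFrom x xs else 1

-- sum of contributions of all maximal runs starting strictly inside the tail
def gsum (limit : Int) : Int → List Int → Int
  | _, [] => 0
  | p, x :: xs => (if x = p + 1 then 0 else contrib limit (runFrom x xs)) + gsum limit x xs

-- per-element contribution computed by B's loop body
def gB (limit : Int) (S : List Int) (v : Int) : Int :=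
  if PySem.Set.contains S (v - 1) then 0 else contrib limit (1 + bWalk S v S.length)

lemma aLoop_eq (limit : Int) (xs : List Int) : ∀ (prev ov run : Int),
    aLoop limit prev xs ov run = ov + contrib limit (run - 1 + runFrom prev xs) + gsum limit prev xs := by
  induction xs with
  | nil =>
      intro prev ov run
      simp only [aLoop, runFrom, gsum, contrib]
      split_ifs <;> omega
  | cons x xs ih =>
      intro prev ov run
      by_cases hx : x = prev + 1
      · rw [show aLoop limit prev (x :: xs) ov run = aLoop limit x xs ov (run + 1) from by
            simp [aLoop, hx]]
        rw [ih,
            show runFrom prev (x :: xs) = 1 + runFrom x xs from by simp [runFrom, hx],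
            show gsum limit prev (x :: xs) = gsum limit x xs from by simp [gsum, hx]]
        have h1 : run + 1 - 1 + runFrom x xs = run - 1 + (1 + runFrom x xs) := by ring
        rw [h1]
      · rw [show aLoop limit prev (x :: xs) ov run
              = aLoop limit x xs (if run > limit then ov + (run - limit) else ov) 1 from by
            simp [aLoop, hx]]
        rw [ih,
            show runFrom prev (x :: xs) = 1 from by simp [runFrom, hx],
            show gsum limit prev (x :: xs) = contrib limit (runFrom x xs) + gsum limit x xs from by
              simp [gsum, hx]]
        simp only [contrib]
        split_ifs <;> omega

lemma bFold_eq (limit : Int) (S : List Int) (l : List Int) : ∀ (acc : Int),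
    l.foldl (fun total v =>
      if !PySem.Set.contains S (v - 1) then
        let run := 1 + bWalk S v S.length
        if run > limit then total + (run - limit) else total
      else total) acc = acc + (l.map (gB limit S)).sum := by
  induction l with
  | nil => intro acc; simp
  | cons v l ih =>
      intro acc
      have hb : (if !PySem.Set.contains S (v - 1) then
          let run := 1 + bWalk S v S.length
          if run > limit then acc + (run - limit) else acc
        else acc) = acc + gB limit S v := by
        by_cases h : v - 1 ∈ S
        · simp [gB, PySem.Set.contains, h]
        · simp only [gB, contrib, PySem.Set.contains]
          simp [h]
          split_ifs <;> omega
      simp only [List.foldl_cons, List.map_cons, List.sum_cons, hb, ih]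
      ring

lemma walk_eq (S : List Int) : ∀ (xs : List Int) (v : Int) (fuel : Nat),
    (∀ w, v < w → (w ∈ S ↔ w ∈ v :: xs)) →
    (v :: xs).Pairwise (· < ·) →
    xs.length ≤ fuel →
    (1 : Int) + bWalk S v fuel = runFrom v xs := by
  intro xs
  induction xs with
  | nil =>
      intro v fuel hm _ _
      have hc : v + 1 ∉ S := by
        intro h
        have := (hm (v + 1) (by omega)).mp h
        simp only [List.mem_singleton] at this
        omega
      cases fuel <;> simp [bWalk, runFrom, hc]
  | cons x xs ih =>
      intro v fuel hm hs hf
      have hvx : v < x := (List.pairwise_cons.mp hs).1 x (by simp)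
      have hxs : ∀ y ∈ xs, x < y :=
        fun y hy => (List.pairwise_cons.mp (List.Pairwise.of_cons hs)).1 y hy
      by_cases hx : x = v + 1
      · cases fuel with
        | zero => simp at hf
        | succ f =>
            have hc : v + 1 ∈ S := by
              rw [hm (v + 1) (by omega)]
              simp [hx]
            have hm' : ∀ w, x < w → (w ∈ S ↔ w ∈ x :: xs) := by
              intro w hw
              rw [hm w (by omega)]
              simp only [List.mem_cons]
              constructor
              · rintro (h | h)
                · omega
                · exact h
              · intro h; exact Or.inr h
            have hih := ih x f hm' (List.Pairwise.of_cons hs) (by simpa using Nat.le_of_succ_le_succ hf)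
            have hstep : bWalk S v (f + 1) = 1 + bWalk S (v + 1) f := by
              simp [bWalk, hc]
            rw [hstep, show v + 1 = x from hx.symm,
                show runFrom v (x :: xs) = 1 + runFrom x xs from by simp [runFrom, hx]]
            omega
      · have hc : v + 1 ∉ S := by
          intro h
          have := (hm (v + 1) (by omega)).mp h
          simp only [List.mem_cons] at this
          rcases this with h1 | h1 | h1
          · omega
          · omega
          · have := hxs _ h1; omega
        cases fuel <;> simp [bWalk, runFrom, hc, hx]

lemma bsum_eq (S : List Int) (limit : Int) : ∀ (t : List Int) (prev : Int),
    prev ∈ S →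
    (∀ w, prev < w → (w ∈ S ↔ w ∈ t)) →
    (prev :: t).Pairwise (· < ·) →
    t.length ≤ S.length →
    (t.map (gB limit S)).sum = gsum limit prev t := by
  intro t
  induction t with
  | nil => intro prev _ _ _ _; simp [gsum]
  | cons x xs ih =>
      intro prev hprev hm hs hlen
      have hpx : prev < x := (List.pairwise_cons.mp hs).1 x (by simp)
      have hs' : (x :: xs).Pairwise (· < ·) := List.Pairwise.of_cons hs
      have hxxs : ∀ y ∈ xs, x < y := fun y hy => (List.pairwise_cons.mp hs').1 y hy
      have hxin : x ∈ S := (hm x hpx).mpr (by simp)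
      have hm' : ∀ w, x < w → (w ∈ S ↔ w ∈ xs) := by
        intro w hw
        rw [hm w (by omega)]
        simp only [List.mem_cons]
        constructor
        · rintro (h | h)
          · omega
          · exact h
        · intro h; exact Or.inr h
      have hlen' : xs.length ≤ S.length := by simp at hlen; omega
      have hrec := ih x hxin hm' hs' hlen'
      by_cases hx : x = prev + 1
      · have hc : x - 1 ∈ S := by
          rw [show x - 1 = prev from by omega]
          exact hprev
        simp only [List.map_cons, List.sum_cons, gsum]
        rw [if_pos hx, hrec, show gB limit S x = 0 from by simp [gB, PySem.Set.contains, hc]]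
      · have hc : x - 1 ∉ S := by
          intro h
          have := (hm (x - 1) (by omega)).mp h
          simp only [List.mem_cons] at this
          rcases this with h1 | h1
          · omega
          · have := hxxs _ h1; omega
        have hwalk : (1 : Int) + bWalk S x S.length = runFrom x xs := by
          refine walk_eq S xs x S.length ?_ hs' hlen'
          intro w hw
          exact hm w (by omega)
        simp only [List.map_cons, List.sum_cons, gsum]
        rw [if_neg hx, hrec,
            show gB limit S x = contrib limit (runFrom x xs) from by
              simp [gB, PySem.Set.contains, hc, hwalk]]

theorem consecutive_overflow_py_spec : Claim_equal_consecutive_overflow_py := by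
  intro periods limit _
  unfold Spec_consecutive_overflow_py
  by_cases hl : limit ≤ 0
  · simp [consecutive_overflow_py, consecutive_overflow_py_alt, hl]
  · by_cases hp : periods = []
    · subst hp
      simp [consecutive_overflow_py, consecutive_overflow_py_alt, PySem.Set.ofList]
    · set S : List Int := PySem.Set.ofList periods with hS
      have hperm : (PySem.List.sorted S (fun x => x) false).Perm S := PySem.List.sorted_perm S _ _
      have hpair : (PySem.List.sorted S (fun x => x) false).Pairwise (· < ·) :=
        PySem.List.sorted_ofList_pairwise_lt periods
      have hmemS : ∀ w : Int, w ∈ S ↔ w ∈ PySem.List.sorted S (fun x => x) false := by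
        intro w
        rw [hperm.mem_iff]
      cases hsor : PySem.List.sorted S (fun x => x) false with
      | nil =>
          exfalso
          have hS0 : S = [] :=
            (PySem.List.sorted_eq_nil_iff (xs := S) (key := fun x => x) (rev := false)).mp hsor
          rcases List.exists_mem_of_ne_nil periods hp with ⟨a, ha⟩
          have haS : a ∈ S := (PySem.Set.mem_ofList periods a).mpr ha
          rw [hS0] at haS
          simp at haS
      | cons h t =>
          rw [hsor] at hperm hpair hmemS
          have hlen : t.length ≤ S.length := by
            have := hperm.length_eq
            simp at this
            omega
          have hht : ∀ y ∈ t, h < y := fun y hy => (List.pairwise_cons.mp hpair).1 y hy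
          have hhin : h ∈ S := (hmemS h).mpr (by simp)
          have hA : consecutive_overflow_py periods limit = aLoop limit h t 0 1 := by
            unfold consecutive_overflow_py
            rw [if_neg (by tauto), ← hS, hsor]
          have hB : consecutive_overflow_py_alt periods limit = 0 + (S.map (gB limit S)).sum := by
            unfold consecutive_overflow_py_alt
            rw [if_neg hl, ← hS]
            exact bFold_eq limit S S 0
          rw [hA, hB, aLoop_eq]
          have hsum : (S.map (gB limit S)).sum = ((h :: t).map (gB limit S)).sum :=
            (hperm.map (gB limit S)).sum_eq.symm
          rw [hsum]
          have hch : h - 1 ∉ S := by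
            intro hcc
            have := (hmemS (h - 1)).mp hcc
            simp only [List.mem_cons] at this
            rcases this with h1 | h1
            · omega
            · have := hht _ h1; omega
          have hwalkh : (1 : Int) + bWalk S h S.length = runFrom h t := by
            refine walk_eq S t h S.length ?_ hpair hlen
            intro w _
            exact hmemS w
          have htail : (t.map (gB limit S)).sum = gsum limit h t := by
            refine bsum_eq S limit t h hhin ?_ hpair hlen
            intro w hw
            rw [hmemS w]
            simp only [List.mem_cons]
            constructor
            · rintro (h1 | h1)
              · omega
              · exact h1
            · intro h1; exact Or.inr h1
          simp only [List.map_cons, List.sum_cons]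
          rw [htail,
              show gB limit S h = contrib limit (runFrom h t) from by
                simp [gB, PySem.Set.contains, hch, hwalkh],
              show (1 : Int) - 1 + runFrom h t = runFrom h t from by ring]
          ring
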